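-- pv_equiv track=rewrite | github.com/CoderBotics-ai-bot/Python | sorts/merge_insertion_sort.py | binary_search_insertion
-- ===== SOURCE A (Python) =====
-- from typing import List
-- from typing import List, Union
-- from typing import List, Union, Tuple
--
-- def binary_search_insertion(sorted_list: List[int], item: int) -> List[int]:
--     """
--     Performs binary search to find an insert position for an item in a sorted list, then inserts the item at that position.
--     This results in a new sorted list which includes the inserted item. The function assumes that the input list is already sorted.
--
--     Args:
--         sorted_list: List of integers, which is sorted in ascending order.
--         item: The integer item to be inserted into the sorted list.
--
--     Returns:
--         A new sorted list which includes the inserted item.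
--
--     >>> binary_search_insertion([1, 2, 7, 9, 10], 4)
--     [1, 2, 4, 7, 9, 10]
--     """
--
--     def find_insert_index(
--         sorted_list: List[int], item: int, left: int, right: int
--     ) -> int:
--         """Helper function to find the correct index for insertion."""
--         while left <= right:
--             middle = (left + right) // 2
--             if left == right:
--                 if sorted_list[middle] < item:
--                     return middle + 1
--                 break
--             elif sorted_list[middle] < item:
--                 left = middle + 1
--             else:
--                 right = middle - 1
--         return left
--
--     insert_index = find_insert_index(sorted_list, item, 0, len(sorted_list) - 1)
--     sorted_list.insert(insert_index, item)
--     return sorted_list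
-- ===== SOURCE B (Python) =====
-- from typing import List
--
--
-- def binary_search_insertion(sorted_list: List[int], item: int) -> List[int]:
--     """Insert item into the sorted list by a single linear forward scan:
--     the insertion point is the first position whose element is >= item
--     (bisect_left semantics), so ties go before equal elements, as in A.
--     Mutates and returns the same list object, like A."""
--     for i, v in enumerate(sorted_list):
--         if v >= item:
--             insert_index = i
--             break
--     else:
--         insert_index = len(sorted_list)
--     sorted_list.insert(insert_index, item)
--     return sorted_list
-- ===== Notes on version B (the rewrite author's own statement) =====
-- stated objective: simpler
-- what changed: Replaces the hand-written binary search (while loop with left/right/middle index arithmetic) by a single linear forward scan for the first element >= item; same bisect_left insertion point and same in-place insert; Pre_ excludes lists not partitioned about item (A assumes sorted input), where A's binary-search index is an accident of the probing order.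
-- outside the precondition, e.g. on binary_search_insertion([9, 0, 0, 0], 5): A returns [9, 0, 0, 0, 5], B returns [5, 9, 0, 0, 0]
import Mathlib
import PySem

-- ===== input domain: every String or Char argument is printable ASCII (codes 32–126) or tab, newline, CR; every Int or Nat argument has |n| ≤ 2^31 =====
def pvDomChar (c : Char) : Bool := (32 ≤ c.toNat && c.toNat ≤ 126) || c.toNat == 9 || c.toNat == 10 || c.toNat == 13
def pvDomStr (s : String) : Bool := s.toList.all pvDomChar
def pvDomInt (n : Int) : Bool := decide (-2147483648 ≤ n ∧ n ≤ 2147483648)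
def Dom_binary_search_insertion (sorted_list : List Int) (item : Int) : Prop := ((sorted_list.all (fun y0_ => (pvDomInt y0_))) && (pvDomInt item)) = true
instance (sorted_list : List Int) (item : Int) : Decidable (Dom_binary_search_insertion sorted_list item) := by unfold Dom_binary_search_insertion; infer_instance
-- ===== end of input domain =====

-- B replaces A's hand-written binary search by a single linear forward scan for the
-- first element ≥ item (same bisect_left insertion point on sorted input); simpler.
-- Both A and B mutate the argument list in place in Python; the equivalence proved
-- here is about the returned value.

-- ===== PORT A =====
-- helper `find_insert_index` of A; the while loop becomes recursion on (right+1-left).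
-- `sorted_list[middle]` is ported as pyGetD _ _ 0: exact, since every call from the
-- port keeps 0 ≤ left ≤ middle ≤ right ≤ len-1, so the index is always in range.
def pvFII (a : List Int) (item : Int) (l r : Int) : Int :=
  if h : l ≤ r then
    let m := PySem.Int.floordiv (l + r) 2
    if l = r then
      if PySem.List.pyGetD a m 0 < item then m + 1 else l
    else if PySem.List.pyGetD a m 0 < item then
      pvFII a item (m + 1) r
    else
      pvFII a item l (m - 1)
  else l
termination_by (r + 1 - l).toNat
decreasing_by
  · have := PySem.Int.floordiv_two_mid_bounds h
    omega
  · have := PySem.Int.floordiv_two_mid_bounds h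
    omega

def binary_search_insertion (sorted_list : List Int) (item : Int) : List Int :=
  let insert_index := pvFII sorted_list item 0 ((sorted_list.length : Int) - 1)
  PySem.List.insert sorted_list insert_index item

-- ===== PORT B =====
-- the for/else scan of Source B: first index whose element is ≥ item, else len(list)
def pvScan (item : Int) : List Int → Int → Int
  | [], i => i
  | v :: t, i => if v ≥ item then i else pvScan item t (i + 1)

def binary_search_insertion_alt (sorted_list : List Int) (item : Int) : List Int :=
  PySem.List.insert sorted_list (pvScan item sorted_list 0) item

-- ===== PRECONDITION & SPEC =====
-- Pre_ admits every list that is partitioned about item (every element from the first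
-- one ≥ item onward is ≥ item) — in particular every sorted list, A's documented domain.
-- It excludes the non-partitioned (hence unsorted) lists: there A still returns, but the
-- index its binary search lands on is an accident of the probing order, while B inserts
-- at the first element ≥ item; neither value is specified.
def Pre_binary_search_insertion (sorted_list : List Int) (item : Int) : Prop :=
  ((sorted_list.dropWhile (fun v => decide (v < item))).all (fun v => decide (item ≤ v))) = true
instance (sorted_list : List Int) (item : Int) : Decidable (Pre_binary_search_insertion sorted_list item) := by unfold Pre_binary_search_insertion; infer_instance
def pvWitness_binary_search_insertion : List Int × Int := ([1, 2, 7, 9, 10], 4)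

def Spec_binary_search_insertion (sorted_list : List Int) (item : Int) (out : List Int) : Prop := out = binary_search_insertion_alt sorted_list item
instance (sorted_list : List Int) (item : Int) (out : List Int) : Decidable (Spec_binary_search_insertion sorted_list item out) := by unfold Spec_binary_search_insertion; infer_instance

-- ===== CLAIM (what is proved, stated in full; the proofs are below) =====
def Claim_equal_binary_search_insertion : Prop := ∀ (sorted_list : List Int) (item : Int), Dom_binary_search_insertion sorted_list item → Pre_binary_search_insertion sorted_list item → Spec_binary_search_insertion sorted_list item (binary_search_insertion sorted_list item)

-- ===== LEMMAS AND PROOFS =====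

-- B's scan returns i + (index of the first element ≥ item, or the length)
theorem pvScan_eq (item : Int) (a : List Int) (i : Int) :
    pvScan item a i = i + (a.findIdx (fun v => item ≤ v) : Int) := by
  induction a generalizing i with
  | nil => simp [pvScan, List.findIdx]
  | cons v t ih =>
    by_cases hv : item ≤ v
    · simp [pvScan, hv, List.findIdx_cons]
    · have : ¬ (v ≥ item) := hv
      simp only [pvScan, if_neg this, ih, List.findIdx_cons]
      simp [hv]
      omega

-- on a list partitioned about item, every element from the first one ≥ item on is ≥ item
theorem part_ge (a : List Int) (item : Int)
    (hp : ((a.dropWhile (fun v => decide (v < item))).all (fun v => decide (item ≤ v))) = true) :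
    ∀ i, (hi : i < a.length) → a.findIdx (fun v => item ≤ v) ≤ i → item ≤ a[i] := by
  induction a with
  | nil => intro i hi; simp at hi
  | cons v t ih =>
    intro i hi hKi
    by_cases hv : item ≤ v
    · have hdw : (v :: t).dropWhile (fun v => decide (v < item)) = v :: t := by
        simp [show ¬ v < item by omega]
      rw [hdw] at hp
      have := List.all_eq_true.mp hp ((v :: t)[i]) (List.getElem_mem hi)
      simpa using this
    · have hlt : v < item := by omega
      have hdw : (v :: t).dropWhile (fun v => decide (v < item)) =
          t.dropWhile (fun v => decide (v < item)) := by
        simp [hlt]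
      have hfi : (v :: t).findIdx (fun v => item ≤ v) =
          t.findIdx (fun v => item ≤ v) + 1 := by
        simp [List.findIdx_cons, hv]
      rw [hdw] at hp
      rw [hfi] at hKi
      match i with
      | 0 => omega
      | j + 1 =>
        have := ih hp j (by simpa using hi) (by omega)
        simpa using this

-- on a list partitioned about item, a[i] < item ↔ i is left of the first element ≥ item
theorem sorted_lt_iff (a : List Int) (item : Int)
    (hp : ((a.dropWhile (fun v => decide (v < item))).all (fun v => decide (item ≤ v))) = true)
    (i : Nat) (hi : i < a.length) :
    a[i] < item ↔ i < a.findIdx (fun v => item ≤ v) := by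
  constructor
  · intro hlt
    by_contra hKi
    have := part_ge a item hp i hi (by omega)
    omega
  · intro hiK
    have := List.not_of_lt_findIdx (p := fun v => decide (item ≤ v)) (xs := a) hiK
    simp only [decide_eq_false_iff_not, not_le] at this
    exact this

-- A's binary search: whenever the bisect_left index K is bracketed by [l, r+1],
-- the loop returns K
theorem pvFII_eq (a : List Int) (item : Int)
    (hs : ((a.dropWhile (fun v => decide (v < item))).all (fun v => decide (item ≤ v))) = true) :
    ∀ (n : Nat) (l r : Int), (r + 1 - l).toNat ≤ n → 0 ≤ l → r ≤ (a.length : Int) - 1 →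
      l ≤ (a.findIdx (fun v => item ≤ v) : Int) →
      (a.findIdx (fun v => item ≤ v) : Int) ≤ r + 1 →
      pvFII a item l r = (a.findIdx (fun v => item ≤ v) : Int) := by
  intro n
  induction n with
  | zero =>
    intro l r hm h0 _ hlK hKr
    have hrl : ¬ l ≤ r := by omega
    rw [pvFII, dif_neg hrl]
    omega
  | succ n ih =>
    intro l r hm h0 hr hlK hKr
    set K := a.findIdx (fun v => item ≤ v) with hKdef
    by_cases hlr : l ≤ r
    · have hmid := PySem.Int.floordiv_two_mid_bounds hlr
      set m := PySem.Int.floordiv (l + r) 2 with hmdef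
      have hm0 : 0 ≤ m := by omega
      have hmlen : m < (a.length : Int) := by omega
      have hget : PySem.List.pyGetD a m 0 = a[m.toNat]'(by omega) := by
        exact PySem.List.pyGetD_eq_getElem _ _ hm0 (by omega)
      have hiff : a[m.toNat]'(by omega) < item ↔ m.toNat < K :=
        sorted_lt_iff a item hs m.toNat (by omega)
      rw [pvFII, dif_pos hlr]
      simp only [← hmdef]
      by_cases heq : l = r
      · have hml : m = l := by
          rw [hmdef, ← heq, PySem.Int.floordiv_eq_ediv_of_pos (by norm_num)]
          omega
        simp only [if_pos heq, hget]
        by_cases hless : a[m.toNat]'(by omega) < item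
        · rw [if_pos hless]
          have : m.toNat < K := hiff.mp hless
          omega
        · rw [if_neg hless]
          have : ¬ m.toNat < K := fun h => hless (hiff.mpr h)
          omega
      · simp only [if_neg heq, hget]
        by_cases hless : a[m.toNat]'(by omega) < item
        · rw [if_pos hless]
          have hmK : m.toNat < K := hiff.mp hless
          exact ih (m + 1) r (by omega) (by omega) hr (by omega) hKr
        · rw [if_neg hless]
          have hKm : ¬ m.toNat < K := fun h => hless (hiff.mpr h)
          exact ih l (m - 1) (by omega) h0 (by omega) hlK (by omega)
    · rw [pvFII, dif_neg hlr]
      omega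

-- ===== VERDICT (by name: the statement is the Claim_ definition above) =====
theorem binary_search_insertion_spec : Claim_equal_binary_search_insertion := by
  intro a item _ hpre
  unfold Spec_binary_search_insertion binary_search_insertion binary_search_insertion_alt
  have hK : (a.findIdx (fun v => item ≤ v) : Int) ≤ (a.length : Int) := by
    exact_mod_cast List.findIdx_le_length
  have hA := pvFII_eq a item hpre (((a.length : Int) - 1 + 1 - 0).toNat) 0
    ((a.length : Int) - 1) (le_refl _) (le_refl _) (le_refl _) (by positivity)
    (by omega)
  rw [hA, pvScan_eq]
  simp
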